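-- pv_equiv track=rewrite | github.com/tdjohner/Python_projects | Lab7TJ.py | is_submap
-- ===== SOURCE A (Python) =====
-- def is_submap(dict1, dict2):
--     mapFail = 0
--     for i in dict1.keys():
--         for k in dict2.keys():
--             if i in k and dict1[i] == dict2[k]:
--                 mapFail = 1
--
--     if mapFail == 1:
--         return True
--     else:
--         return False
-- ===== SOURCE B (Python) =====
-- def is_submap(dict1, dict2):
--     index = {}
--     for k, v in dict2.items():
--         index.setdefault(v, []).append(k)
--     for i, v in dict1.items():
--         for k in index.get(v, []):
--             if i in k:
--                 return True
--     return False
-- ===== Notes on version B (the rewrite author's own statement) =====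
-- stated objective: faster
-- what changed: B builds a value->keys index over dict2 in one pass and scans dict1 testing the substring only against keys whose value matches, returning on the first hit, instead of A's exhaustive flag-setting scan over all key pairs.
import Mathlib
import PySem

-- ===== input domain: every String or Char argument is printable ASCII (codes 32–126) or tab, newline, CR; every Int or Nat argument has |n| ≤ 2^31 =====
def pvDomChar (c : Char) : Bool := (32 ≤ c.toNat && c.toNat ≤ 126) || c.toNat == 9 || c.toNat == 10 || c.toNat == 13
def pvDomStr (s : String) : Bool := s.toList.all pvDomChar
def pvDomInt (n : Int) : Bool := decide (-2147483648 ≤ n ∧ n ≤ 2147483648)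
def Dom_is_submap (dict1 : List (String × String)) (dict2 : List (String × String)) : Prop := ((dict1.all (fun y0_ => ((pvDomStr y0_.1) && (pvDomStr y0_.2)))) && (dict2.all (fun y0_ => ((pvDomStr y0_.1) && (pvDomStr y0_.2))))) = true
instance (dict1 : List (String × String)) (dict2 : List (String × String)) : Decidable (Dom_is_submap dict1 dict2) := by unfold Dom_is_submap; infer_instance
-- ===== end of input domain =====

-- B replaces A's exhaustive nested key scan by a value->keys index over dict2 with a filtered early-exit pass over dict1 (alternative algorithm, same result).



-- ===== PORT A =====
-- Port of A: build dicts from the association lists (Python dict(list): later duplicate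
-- key overwrites in place), then the exhaustive nested scan over keys with a flag.
-- dict1[i] / dict2[k] are ported as get? (both keys come from .keys(), so lookup succeeds).
def is_submap (dict1 : List (String × String)) (dict2 : List (String × String)) : Bool :=
  let d1 := PySem.Dict.ofList dict1
  let d2 := PySem.Dict.ofList dict2
  let mapFail : Int := d1.keys.foldl (fun mf i =>
    d2.keys.foldl (fun mf k =>
      if PySem.Str.isIn i k && (d1.get? i == d2.get? k) then 1 else mf) mf) 0
  if mapFail == 1 then true else false

-- ===== PORT B =====
-- B-side helper: the dict1 loop with early return.
def isSubmapGo (index : PySem.Dict String (List String)) : List (String × String) → Bool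
  | [] => false
  | (i, v) :: rest =>
      if (index.getD v []).any (fun k => PySem.Str.isIn i k) then true
      else isSubmapGo index rest

def is_submap_alt (dict1 : List (String × String)) (dict2 : List (String × String)) : Bool :=
  let d1 := PySem.Dict.ofList dict1
  let d2 := PySem.Dict.ofList dict2
  let index : PySem.Dict String (List String) :=
    d2.items.foldl (fun ix p => ix.modify p.2 [] (fun ks => ks ++ [p.1])) PySem.Dict.empty
  isSubmapGo index d1.items

-- ===== PRECONDITION & SPEC =====
def Spec_is_submap (dict1 : List (String × String)) (dict2 : List (String × String)) (out : Bool) : Prop := out = is_submap_alt dict1 dict2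
instance (dict1 : List (String × String)) (dict2 : List (String × String)) (out : Bool) : Decidable (Spec_is_submap dict1 dict2 out) := by unfold Spec_is_submap; infer_instance

-- ===== CLAIM (what is proved, stated in full; the proofs are below) =====
def Claim_equal_is_submap : Prop := ∀ (dict1 : List (String × String)) (dict2 : List (String × String)), Dom_is_submap dict1 dict2 → Spec_is_submap dict1 dict2 (is_submap dict1 dict2)

-- ===== LEMMAS AND PROOFS =====

-- ===== VERDICT (by name: the statement is the Claim_ definition above) =====

-- flag-setting loop: the fold returns 1 iff some element satisfies c (else the start value)
lemma foldl_flag {α : Type} (c : α → Bool) (l : List α) (a : Int) :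
    l.foldl (fun mf x => if c x then 1 else mf) a = if l.any c then 1 else a := by
  induction l generalizing a with
  | nil => simp
  | cons x xs ih =>
      simp only [List.foldl_cons, ih, List.any_cons]
      rcases Bool.eq_false_or_eq_true (c x) with h | h <;>
        rcases Bool.eq_false_or_eq_true (xs.any c) with h2 | h2 <;> simp [h, h2]

lemma isSubmapGo_eq_any (index : PySem.Dict String (List String)) (l : List (String × String)) :
    isSubmapGo index l
      = l.any (fun p => (index.getD p.2 []).any (fun k => PySem.Str.isIn p.1 k)) := by
  induction l with
  | nil => rfl
  | cons p rest ih =>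
      obtain ⟨i, v⟩ := p
      simp only [isSubmapGo, List.any_cons]
      rcases Bool.eq_false_or_eq_true ((index.getD v []).any (fun k => PySem.Str.isIn i k)) with
        h | h <;> rw [h] <;> simp [ih]

-- grouping fold: the value→keys index maps v to the keys of l whose value is v (in order)
lemma index_getD (l : List (String × String)) (ix0 : PySem.Dict String (List String)) (v : String) :
    (l.foldl (fun ix p => ix.modify p.2 [] (fun ks => ks ++ [p.1])) ix0).getD v []
      = ix0.getD v [] ++ (l.filter (fun q => q.2 == v)).map (·.1) := by
  induction l generalizing ix0 with
  | nil => simp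
  | cons p rest ih =>
      simp only [List.foldl_cons, ih, List.filter_cons]
      rw [PySem.Dict.getD_modify]
      by_cases h : v = p.2
      · simp [h, List.append_assoc]
      · have : (p.2 == v) = false := by simp [Ne.symm h]
        simp [h, this]

theorem is_submap_spec : Claim_equal_is_submap := by
  intro dict1 dict2 _
  unfold Spec_is_submap
  have nd1 : (PySem.Dict.ofList dict1).keys.Nodup := PySem.Dict.nodup_keys_ofList dict1
  have nd2 : (PySem.Dict.ofList dict2).keys.Nodup := PySem.Dict.nodup_keys_ofList dict2
  have hf : (fun (mf : Int) i => (PySem.Dict.ofList dict2).keys.foldl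
        (fun mf k => if PySem.Str.isIn i k &&
          ((PySem.Dict.ofList dict1).get? i == (PySem.Dict.ofList dict2).get? k)
          then 1 else mf) mf)
      = (fun (mf : Int) i => if (PySem.Dict.ofList dict2).keys.any
          (fun k => PySem.Str.isIn i k &&
            ((PySem.Dict.ofList dict1).get? i == (PySem.Dict.ofList dict2).get? k))
          then 1 else mf) := by
    funext mf i
    exact foldl_flag _ _ mf
  have hA : is_submap dict1 dict2
      = ((PySem.Dict.ofList dict1).keys.any fun i => (PySem.Dict.ofList dict2).keys.any
          fun k => PySem.Str.isIn i k &&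
            ((PySem.Dict.ofList dict1).get? i == (PySem.Dict.ofList dict2).get? k)) := by
    show (if (((PySem.Dict.ofList dict1).keys.foldl (fun (mf : Int) i =>
        (PySem.Dict.ofList dict2).keys.foldl
          (fun mf k => if PySem.Str.isIn i k &&
            ((PySem.Dict.ofList dict1).get? i == (PySem.Dict.ofList dict2).get? k)
            then 1 else mf) mf) 0) == 1) then true else false) = _
    rw [hf, foldl_flag]
    rcases Bool.eq_false_or_eq_true ((PySem.Dict.ofList dict1).keys.any fun i =>
        (PySem.Dict.ofList dict2).keys.any fun k => PySem.Str.isIn i k &&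
          ((PySem.Dict.ofList dict1).get? i == (PySem.Dict.ofList dict2).get? k)) with
      h | h <;> rw [h] <;> simp
  have hB : is_submap_alt dict1 dict2
      = ((PySem.Dict.ofList dict1).items.any fun p =>
          (((PySem.Dict.ofList dict2).items.filter fun q => q.2 == p.2).map (·.1)).any
            fun k => PySem.Str.isIn p.1 k) := by
    show isSubmapGo ((PySem.Dict.ofList dict2).items.foldl
        (fun ix p => ix.modify p.2 [] (fun ks => ks ++ [p.1])) PySem.Dict.empty)
        (PySem.Dict.ofList dict1).items = _
    rw [isSubmapGo_eq_any]
    have hidx : ∀ v : String, (((PySem.Dict.ofList dict2).items.foldl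
        (fun ix p => ix.modify p.2 [] (fun ks => ks ++ [p.1])) PySem.Dict.empty).getD v [])
        = ((PySem.Dict.ofList dict2).items.filter (fun q => q.2 == v)).map (·.1) := by
      intro v
      rw [index_getD]
      simp
    simp only [hidx]
  rw [hA, hB, Bool.eq_iff_iff]
  simp only [List.any_eq_true, List.mem_map, List.mem_filter]
  constructor
  · rintro ⟨i, hi, k, hk, hik⟩
    obtain ⟨vi, hvi⟩ : ∃ v, (PySem.Dict.ofList dict1).get? i = some v := by
      cases hg : (PySem.Dict.ofList dict1).get? i with
      | none => exact absurd hi ((PySem.Dict.get?_eq_none_iff_not_mem_keys _ _).mp hg)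
      | some v => exact ⟨v, rfl⟩
    obtain ⟨wk, hwk⟩ : ∃ w, (PySem.Dict.ofList dict2).get? k = some w := by
      cases hg : (PySem.Dict.ofList dict2).get? k with
      | none => exact absurd hk ((PySem.Dict.get?_eq_none_iff_not_mem_keys _ _).mp hg)
      | some w => exact ⟨w, rfl⟩
    rw [hvi, hwk] at hik
    simp only [Bool.and_eq_true, beq_iff_eq, Option.some.injEq] at hik
    obtain ⟨hin, hvw⟩ := hik
    exact ⟨(i, vi), PySem.Dict.mem_items_of_get?_eq_some _ hvi,
      k, ⟨(k, wk), ⟨PySem.Dict.mem_items_of_get?_eq_some _ hwk, by simp [hvw]⟩, rfl⟩, hin⟩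
  · rintro ⟨p, hp, k, ⟨q, ⟨hq, hqv⟩, hqk⟩, hin⟩
    refine ⟨p.1, PySem.Dict.mem_keys_of_mem_items _ hp,
      q.1, PySem.Dict.mem_keys_of_mem_items _ hq, ?_⟩
    have h1 : (PySem.Dict.ofList dict1).get? p.1 = some p.2 :=
      PySem.Dict.get?_of_mem_items _ hp nd1
    have h2 : (PySem.Dict.ofList dict2).get? q.1 = some q.2 :=
      PySem.Dict.get?_of_mem_items _ hq nd2
    subst hqk
    simp [h1, h2, beq_iff_eq.mp hqv]
    exact hin
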